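-- pv_equiv track=rewrite | github.com/cnm13ryan/deepagents | scripts/sweep_status.py | replace_lines
-- ===== SOURCE A (Python) =====
-- def replace_lines(text: str, replacements: dict[int, str]) -> str:
--     out_lines = []
--     for i, line in enumerate(text.splitlines()):
--         if i in replacements:
--             out_lines.append(replacements[i])
--         else:
--             out_lines.append(line)
--     return "\n".join(out_lines) + ("\n" if text.endswith("\n") else "")
-- ===== SOURCE B (Python) =====
-- def replace_lines(text: str, replacements: dict[int, str]) -> str:
--     lines = text.splitlines()
--     for i, v in replacements.items():
--         if 0 <= i < len(lines):
--             lines[i] = v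
--     return "\n".join(lines) + ("\n" if text.endswith("\n") else "")
-- ===== Notes on version B (the rewrite author's own statement) =====
-- stated objective: alternative
-- what changed: B inverts the traversal: instead of testing every enumerated line for dict membership, it splits once and iterates over the replacement items, writing each in-range index directly into the line list.
import Mathlib
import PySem

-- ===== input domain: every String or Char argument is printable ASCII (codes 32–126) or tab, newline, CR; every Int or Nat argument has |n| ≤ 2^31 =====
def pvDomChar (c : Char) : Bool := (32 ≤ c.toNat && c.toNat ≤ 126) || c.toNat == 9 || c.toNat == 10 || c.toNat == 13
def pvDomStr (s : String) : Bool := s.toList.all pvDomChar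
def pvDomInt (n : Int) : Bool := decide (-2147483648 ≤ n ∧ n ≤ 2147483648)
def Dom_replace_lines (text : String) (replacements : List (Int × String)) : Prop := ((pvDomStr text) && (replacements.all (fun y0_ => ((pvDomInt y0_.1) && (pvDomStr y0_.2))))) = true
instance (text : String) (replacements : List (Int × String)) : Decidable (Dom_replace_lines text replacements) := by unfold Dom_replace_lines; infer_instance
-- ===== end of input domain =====

-- B iterates over the replacement items and writes in-range indices into the split line list,
-- instead of A's membership test on every enumerated line; same cost, different traversal.

-- ===== PORT A =====
def replace_lines (text : String) (replacements : List (Int × String)) : String :=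
  let out_lines := (PySem.List.enumerate (PySem.Str.splitlines text) 0).foldl
    (fun acc p =>
      match replacements.find? (fun q => q.1 == p.1) with   -- 'i in replacements' + 'replacements[i]' (first match = dict lookup)
      | some q => acc ++ [q.2]
      | none   => acc ++ [p.2]) []
  PySem.Str.join "\n" out_lines ++ (if PySem.Str.endswith text "\n" then "\n" else "")

-- ===== PORT B =====
def replace_lines_alt (text : String) (replacements : List (Int × String)) : String :=
  let lines := PySem.Str.splitlines text
  let lines := replacements.foldl
    (fun ls p => if 0 ≤ p.1 ∧ p.1 < (ls.length : Int) then ls.set p.1.toNat p.2 else ls) lines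
  PySem.Str.join "\n" lines ++ (if PySem.Str.endswith text "\n" then "\n" else "")

-- ===== PRECONDITION & SPEC =====
-- Pre_ excludes association lists with duplicate keys: a Python dict never contains them
-- (duplicates collapse before either function runs), and on such lists A's first-match
-- lookup and B's last-write are equally defensible readings of 'dict'.
def Pre_replace_lines (text : String) (replacements : List (Int × String)) : Prop :=
  (replacements.map Prod.fst).Nodup
instance (text : String) (replacements : List (Int × String)) : Decidable (Pre_replace_lines text replacements) := by unfold Pre_replace_lines; infer_instance
def pvWitness_replace_lines : String × (List (Int × String)) := ("a\nb\n", [(0, "X"), (5, "Y")])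

def Spec_replace_lines (text : String) (replacements : List (Int × String)) (out : String) : Prop := out = replace_lines_alt text replacements
instance (text : String) (replacements : List (Int × String)) (out : String) : Decidable (Spec_replace_lines text replacements out) := by unfold Spec_replace_lines; infer_instance

-- ===== CLAIM (what is proved, stated in full; the proofs are below) =====
def Claim_equal_replace_lines : Prop := ∀ (text : String) (replacements : List (Int × String)), Dom_replace_lines text replacements → Pre_replace_lines text replacements → Spec_replace_lines text replacements (replace_lines text replacements)

-- ===== LEMMAS AND PROOFS =====

-- A's append loop is a map over the enumerated lines.
lemma foldlA_eq (repl : List (Int × String)) :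
    ∀ (l : List (Int × String)) (acc : List String),
      l.foldl (fun acc p =>
        match repl.find? (fun q => q.1 == p.1) with
        | some q => acc ++ [q.2]
        | none   => acc ++ [p.2]) acc
      = acc ++ l.map (fun p =>
          match repl.find? (fun q => q.1 == p.1) with
          | some q => q.2
          | none   => p.2) := by
  intro l
  induction l with
  | nil => intro acc; simp
  | cons x xs ih =>
      intro acc
      simp only [List.foldl_cons, List.map_cons]
      rcases h : repl.find? (fun q => q.1 == x.1) with _ | q <;> simp [h, ih]

lemma length_foldlB :
    ∀ (repl : List (Int × String)) (lines : List String),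
      (repl.foldl (fun ls p => if 0 ≤ p.1 ∧ p.1 < (ls.length : Int) then ls.set p.1.toNat p.2 else ls) lines).length
        = lines.length := by
  intro repl
  induction repl with
  | nil => intro lines; rfl
  | cons x xs ih =>
      intro lines
      simp only [List.foldl_cons]
      rw [ih]
      split <;> simp

lemma get_foldlB :
    ∀ (repl : List (Int × String)), (repl.map Prod.fst).Nodup →
      ∀ (lines : List String) (j : Nat) (_hj : j < lines.length),
      (repl.foldl (fun ls p => if 0 ≤ p.1 ∧ p.1 < (ls.length : Int) then ls.set p.1.toNat p.2 else ls) lines)[j]?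
        = some (match repl.find? (fun q => q.1 == (j : Int)) with
                | some q => q.2
                | none   => lines[j]) := by
  intro repl
  induction repl with
  | nil =>
      intro _ lines j hj
      simp [List.getElem?_eq_getElem hj]
  | cons x xs ih =>
      intro hnd lines j hj
      rw [List.map_cons] at hnd
      have hx : x.1 ∉ xs.map Prod.fst := (List.nodup_cons.mp hnd).1
      have hxs : (xs.map Prod.fst).Nodup := (List.nodup_cons.mp hnd).2
      simp only [List.foldl_cons, List.find?_cons]
      by_cases hk : x.1 = (j : Int)
      · -- this key writes position j; no later key can equal it
        have hfind : xs.find? (fun q => q.1 == (j : Int)) = none := by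
          apply List.find?_eq_none.mpr
          intro q hq h
          apply hx
          have hq1 : q.1 = x.1 := by rw [hk]; exact beq_iff_eq.mp h
          exact hq1 ▸ List.mem_map_of_mem hq
        have hcond : 0 ≤ x.1 ∧ x.1 < (lines.length : Int) :=
          ⟨by rw [hk]; exact Int.natCast_nonneg j, by rw [hk]; exact_mod_cast hj⟩
        have hjx : x.1.toNat = j := by omega
        have hIH := ih hxs (lines.set x.1.toNat x.2) j (by simpa using hj)
        rw [if_pos hcond, hIH, hfind]
        simp [hk, hjx, List.getElem_set_self]
      · -- key ≠ j: the write (if any) does not touch position j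
        have hbeq : (x.1 == (j : Int)) = false := by simp [hk]
        simp only [hbeq]
        split
        · next hcond =>
            have hIH := ih hxs (lines.set x.1.toNat x.2) j (by simpa using hj)
            have hne : x.1.toNat ≠ j := by omega
            rw [hIH]
            simp [List.getElem_set_ne, hne]
        · exact ih hxs lines j hj

lemma mapA_eq_foldlB (repl : List (Int × String)) (hnd : (repl.map Prod.fst).Nodup)
    (lines : List String) :
    (PySem.List.enumerate lines 0).map (fun p =>
        match repl.find? (fun q => q.1 == p.1) with
        | some q => q.2
        | none   => p.2)
      = repl.foldl (fun ls p => if 0 ≤ p.1 ∧ p.1 < (ls.length : Int) then ls.set p.1.toNat p.2 else ls) lines := by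
  apply List.ext_getElem?
  intro j
  by_cases hj : j < lines.length
  · rw [get_foldlB repl hnd lines j hj]
    simp [PySem.List.getElem?_enumerate, List.getElem?_eq_getElem hj]
  · have h1 : (repl.foldl (fun ls p => if 0 ≤ p.1 ∧ p.1 < (ls.length : Int) then ls.set p.1.toNat p.2 else ls) lines)[j]? = none := by
      rw [List.getElem?_eq_none_iff, length_foldlB]; omega
    have h2 : ((PySem.List.enumerate lines 0).map (fun p =>
        match repl.find? (fun q => q.1 == p.1) with
        | some q => q.2
        | none   => p.2))[j]? = none := by
      rw [List.getElem?_eq_none_iff]; simp [PySem.List.length_enumerate]; omega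
    rw [h1, h2]

-- ===== VERDICT (by name: the statement is the Claim_ definition above) =====
theorem replace_lines_spec : Claim_equal_replace_lines := by
  intro text repl _ hpre
  unfold Spec_replace_lines replace_lines replace_lines_alt
  simp only []
  rw [foldlA_eq, List.nil_append, mapA_eq_foldlB repl hpre]
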